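-- pv_equiv track=rewrite | github.com/groselt/AoC | 2021/day16.py | decode_t4_value
-- ===== SOURCE A (Python) =====
-- def bin2int(bits: str) -> int:
--     return int(bits, 2)
--
-- def decode_t4_value(body: str) -> tuple[int, int]:
--     data = ''
--     offset = 0
--     last_read = False
--     while not last_read:
--         data += body[offset+1:offset+5]
--         last_read = body[offset] == '0'
--         offset += 5
--     return bin2int(data), offset
-- ===== SOURCE B (Python) =====
-- _BITVAL = {'0': 0, '1': 1}
--
-- def decode_t4_value(body: str) -> tuple[int, int]:
--     def go(offset: int) -> tuple[int, int, int]: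
--         grp = body[offset + 1:offset + 5]
--         nibble = 0
--         for c in grp:
--             nibble = nibble * 2 + _BITVAL[c]
--         if body[offset] == '0':
--             return nibble, len(grp), offset + 5
--         value, bits, end = go(offset + 5)
--         return nibble * 2 ** bits + value, bits + len(grp), end
--     value, _, end = go(0)
--     return value, end
-- ===== Notes on version B (the rewrite author's own statement) =====
-- stated objective: alternative
-- what changed: B is recursive instead of iterative: each call parses one 5-bit group to an integer via a bit-value table and combines it back-to-front with the recursively decoded tail by a power-of-two shift, instead of A's while-loop appending to a string buffer under a last_read flag and parsing the whole buffer once with int(..., 2).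
-- outside the precondition, e.g. on decode_t4_value('0 111'): A returns (7, 5), B raises KeyError; on decode_t4_value('10111010_1'): A returns (61, 10), B raises KeyError
import Mathlib
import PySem

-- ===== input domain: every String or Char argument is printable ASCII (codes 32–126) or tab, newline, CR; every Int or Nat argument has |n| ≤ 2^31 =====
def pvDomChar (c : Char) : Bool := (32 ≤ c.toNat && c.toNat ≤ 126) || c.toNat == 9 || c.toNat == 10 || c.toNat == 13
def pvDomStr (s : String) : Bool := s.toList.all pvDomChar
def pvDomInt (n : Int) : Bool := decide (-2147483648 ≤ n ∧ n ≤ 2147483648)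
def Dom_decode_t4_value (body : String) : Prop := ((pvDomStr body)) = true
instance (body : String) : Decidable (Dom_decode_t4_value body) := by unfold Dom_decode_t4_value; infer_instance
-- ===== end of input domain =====

-- B decodes recursively, combining each 5-bit group back-to-front with the decoded tail
-- by a power-of-two shift, instead of A's imperative string buffer + final int(...,2)
-- parse (objective: alternative, same cost).


-- body[offset+1:offset+5], shared Python expression of both sources
def pvGroup (l : List Char) (offset : Nat) : List Char :=
  PySem.List.slice l (some ((offset + 1 : Nat) : Int)) (some ((offset + 5 : Nat) : Int))

-- ===== PORT A =====
-- int(bits, 2): ported by hand (PySem has no base-2 parse); exact when bits is a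
-- nonempty string of '0'/'1' characters, which Pre_ guarantees for A's final buffer.
def bin2int (bits : List Char) : Int :=
  bits.foldl (fun acc c => 2 * acc + (if c = '1' then 1 else 0)) 0

-- the while-loop of A: accumulates the buffer `data`; none = IndexError at body[offset]
def loopA (l : List Char) : Nat → Nat → List Char → Option (List Char × Nat)
  | 0, _, _ => none  -- fuel exhausted (unreachable: the loop runs at most ⌈len/5⌉ times)
  | fuel + 1, offset, data =>
    if h : offset < l.length then
      let data' := data ++ pvGroup l offset
      if l[offset] = '0' then some (data', offset + 5)
      else loopA l fuel (offset + 5) data'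
    else none

def decode_t4_value (body : String) : Int × Int :=
  match loopA body.toList (body.toList.length + 1) 0 [] with
  | some (data, offset) => (bin2int data, (offset : Int))
  | none => (0, 0)  -- Python A raises here (IndexError); excluded by Pre_

-- ===== PORT B =====
-- _BITVAL = {'0': 0, '1': 1}; lookup _BITVAL[c], none = KeyError
def pvBitVal (c : Char) : Option Int :=
  PySem.Dict.get? (PySem.Dict.ofList [('0', (0 : Int)), ('1', 1)]) c

-- the for-loop over grp inside go: nibble = nibble * 2 + _BITVAL[c]
def parseNib : List Char → Int → Option Int
  | [], nibble => some nibble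
  | c :: cs, nibble =>
    match pvBitVal c with
    | none => none
    | some b => parseNib cs (nibble * 2 + b)

-- the recursion go(offset) of B, returning (value, bits, end); none = any raise
def goB (l : List Char) : Nat → Nat → Option (Int × Nat × Nat)
  | 0, _ => none  -- fuel exhausted (unreachable)
  | fuel + 1, offset =>
    if h : offset < l.length then
      let grp := pvGroup l offset
      match parseNib grp 0 with
      | none => none
      | some nibble =>
        if l[offset] = '0' then some (nibble, grp.length, offset + 5)
        else
          match goB l fuel (offset + 5) with
          | none => none
          | some (value, bits, e) => some (nibble * 2 ^ bits + value, bits + grp.length, e)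
    else none

def decode_t4_value_alt (body : String) : Int × Int :=
  match goB body.toList (body.toList.length + 1) 0 with
  | some (value, _, e) => (value, (e : Int))
  | none => (0, 0)  -- Python B raises here; excluded by Pre_

-- ===== PRECONDITION & SPEC =====
-- Pre_ = the inputs on which Python A returns normally AND its returned value is one B
-- matches: there is a first stop group (char '0' at an in-range multiple of 5) and every
-- non-flag character read up to it is '0'/'1'.  It excludes (a) inputs where A raises
-- (IndexError past the end, ValueError from int(..., 2), including body = "0" whose
-- buffer is empty) and (b) inputs on which A returns only thanks to int() accepting
-- signs/whitespace/underscores inside the buffer (e.g. "0 111", "10111010_1"); B's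
-- per-character table lookup raises KeyError there.
def Pre_decode_t4_value (body : String) : Prop :=
  2 ≤ body.toList.length ∧
  ∃ k < body.toList.length,
    5 * k < body.toList.length ∧
    body.toList.getD (5 * k) ' ' = '0' ∧
    (∀ j < k, body.toList.getD (5 * j) ' ' ≠ '0') ∧
    (∀ i < body.toList.length, i ≤ 5 * k + 4 → i % 5 ≠ 0 →
      body.toList.getD i ' ' = '0' ∨ body.toList.getD i ' ' = '1')

instance (body : String) : Decidable (Pre_decode_t4_value body) := by
  unfold Pre_decode_t4_value; infer_instance

def pvWitness_decode_t4_value : String := "01111"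

def Spec_decode_t4_value (body : String) (out : Int × Int) : Prop := out = decode_t4_value_alt body
instance (body : String) (out : Int × Int) : Decidable (Spec_decode_t4_value body out) := by unfold Spec_decode_t4_value; infer_instance

-- ===== CLAIM (what is proved, stated in full; the proofs are below) =====
def Claim_equal_decode_t4_value : Prop := ∀ (body : String), Dom_decode_t4_value body → Pre_decode_t4_value body → Spec_decode_t4_value body (decode_t4_value body)

-- ===== LEMMAS AND PROOFS =====

lemma pvGroup_eq (l : List Char) (offset : Nat) :
    pvGroup l offset = (l.drop (offset + 1)).take 4 := by
  unfold pvGroup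
  rw [PySem.List.slice_natCast]
  congr 1
  omega

-- a validated group parses to exactly bin2int continued from `nibble`
lemma parseNib_bits : ∀ (g : List Char) (nibble : Int),
    (∀ c ∈ g, c = '0' ∨ c = '1') →
    parseNib g nibble = some (g.foldl (fun acc c => 2 * acc + (if c = '1' then 1 else 0)) nibble) := by
  intro g
  induction g with
  | nil => intro nibble _; simp [parseNib]
  | cons c cs ih =>
    intro nibble hb
    rcases hb c (by simp) with h0 | h1
    · subst h0
      have := ih (nibble * 2 + 0) (fun d hd => hb d (by simp [hd]))
      simp only [parseNib, pvBitVal] at *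
      rw [show PySem.Dict.get? (PySem.Dict.ofList [('0', (0:Int)), ('1', 1)]) '0' = some 0 from by decide]
      simp only [this]
      congr 1
      have : nibble * 2 + 0 = 2 * nibble + (if ('0':Char) = '1' then (1:Int) else 0) := by
        simp; ring
      rw [this]
      simp only [List.foldl_cons]
    · subst h1
      have := ih (nibble * 2 + 1) (fun d hd => hb d (by simp [hd]))
      simp only [parseNib, pvBitVal] at *
      rw [show PySem.Dict.get? (PySem.Dict.ofList [('0', (0:Int)), ('1', 1)]) '1' = some 1 from by decide]
      simp only [this]
      congr 1
      have : nibble * 2 + 1 = 2 * nibble + (if ('1':Char) = '1' then (1:Int) else 0) := by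
        simp; ring
      rw [this]
      simp only [List.foldl_cons]

-- bin2int splits at an append into shift-and-add
lemma bin2int_foldl_shift : ∀ (b : List Char) (x : Int),
    b.foldl (fun acc c => 2 * acc + (if c = '1' then 1 else 0)) x
      = x * 2 ^ b.length + bin2int b := by
  intro b
  induction b with
  | nil => intro x; simp [bin2int]
  | cons c cs ih =>
    intro x
    simp only [List.foldl_cons, List.length_cons]
    rw [ih]
    have h3 : bin2int (c :: cs)
        = List.foldl (fun acc c => 2 * acc + if c = '1' then (1:Int) else 0)
            (2 * 0 + if c = '1' then (1:Int) else 0) cs := rfl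
    rw [h3, ih]
    ring

lemma bin2int_append (a b : List Char) :
    bin2int (a ++ b) = bin2int a * 2 ^ b.length + bin2int b := by
  rw [bin2int, List.foldl_append, ← bin2int, bin2int_foldl_shift]

-- every character of the group body[offset+1:offset+5] sits at an in-range index
lemma pvGroup_mem (l : List Char) (offset : Nat) {c : Char} (hc : c ∈ pvGroup l offset) :
    ∃ r, r < 4 ∧ offset + 1 + r < l.length ∧ c = l.getD (offset + 1 + r) ' ' := by
  rw [pvGroup_eq] at hc
  rcases List.mem_iff_getElem.mp hc with ⟨r, hr, hget⟩
  have hlen : ((l.drop (offset + 1)).take 4).length = min 4 (l.length - (offset + 1)) := by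
    simp
  have hr4 : r < 4 := by omega
  have hin : offset + 1 + r < l.length := by omega
  refine ⟨r, hr4, hin, ?_⟩
  rw [List.getD_eq_getElem l ' ' hin]
  rw [List.getElem_take, List.getElem_drop] at hget
  exact hget.symm

-- the joint invariant: starting at `offset` with k non-final groups ahead, A's loop
-- appends a fixed suffix D to any buffer and B's recursion returns bin2int D with
-- bit-count D.length, both stopping at the same offset
lemma loop_corr (l : List Char) : ∀ (k fuel offset : Nat),
    k < fuel →
    5 * k + offset < l.length →
    l.getD (offset + 5 * k) ' ' = '0' →
    (∀ j < k, l.getD (offset + 5 * j) ' ' ≠ '0') →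
    (∀ i < l.length, offset ≤ i → i ≤ offset + 5 * k + 4 → (i - offset) % 5 ≠ 0 →
      l.getD i ' ' = '0' ∨ l.getD i ' ' = '1') →
    ∃ D, (∀ data, loopA l fuel offset data = some (data ++ D, offset + 5 * k + 5)) ∧
      goB l fuel offset = some (bin2int D, D.length, offset + 5 * k + 5) := by
  intro k
  induction k with
  | zero =>
    intro fuel offset hfuel hlt hstop _ hbits
    obtain ⟨f, rfl⟩ : ∃ f, fuel = f + 1 := ⟨fuel - 1, by omega⟩
    have hoff : offset < l.length := by omega
    have hg : ∀ c ∈ pvGroup l offset, c = '0' ∨ c = '1' := by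
      intro c hc
      rcases pvGroup_mem l offset hc with ⟨r, hr4, hin, hce⟩
      rcases hbits (offset + 1 + r) hin (by omega) (by omega) (by omega) with h | h
      · exact Or.inl (hce.trans h)
      · exact Or.inr (hce.trans h)
    have hstop0 : l[offset] = '0' := by
      rw [← List.getD_eq_getElem l ' ' hoff]
      simpa using hstop
    refine ⟨pvGroup l offset, ?_, ?_⟩
    · intro data
      rw [loopA]; simp [hoff, hstop0]
    · rw [goB]
      simp only [hoff, dif_pos]
      rw [parseNib_bits _ _ hg]
      simp [hstop0, bin2int]
  | succ k ih =>
    intro fuel offset hfuel hlt hstop hfirst hbits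
    obtain ⟨f, rfl⟩ : ∃ f, fuel = f + 1 := ⟨fuel - 1, by omega⟩
    have hoff : offset < l.length := by omega
    have hg : ∀ c ∈ pvGroup l offset, c = '0' ∨ c = '1' := by
      intro c hc
      rcases pvGroup_mem l offset hc with ⟨r, hr4, hin, hce⟩
      rcases hbits (offset + 1 + r) hin (by omega) (by omega) (by omega) with h | h
      · exact Or.inl (hce.trans h)
      · exact Or.inr (hce.trans h)
    have hns : l[offset] ≠ '0' := by
      have h0 := hfirst 0 (by omega)
      rw [← List.getD_eq_getElem l ' ' hoff]
      simpa using h0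
    have hrec := ih f (offset + 5) (by omega) (by omega)
      (by have he : offset + 5 + 5 * k = offset + 5 * (k + 1) := by ring
          rw [he]; exact hstop)
      (by intro j hj
          have he : offset + 5 + 5 * j = offset + 5 * (j + 1) := by ring
          rw [he]; exact hfirst (j + 1) (by omega))
      (by intro i hil h5 hub hm
          exact hbits i hil (by omega) (by omega) (by omega))
    rcases hrec with ⟨D', hA, hB⟩
    have he : offset + 5 * (k + 1) + 5 = offset + 5 + 5 * k + 5 := by ring
    refine ⟨pvGroup l offset ++ D', ?_, ?_⟩
    · intro data
      rw [loopA, he]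
      simp only [hoff, dif_pos, hns, if_false]
      rw [← List.append_assoc]
      exact hA (data ++ pvGroup l offset)
    · rw [goB, he]
      simp only [hoff, dif_pos]
      rw [parseNib_bits _ _ hg]
      show (if l[offset] = '0' then _ else _) = _
      rw [if_neg hns, hB]
      simp only [Option.some.injEq, Prod.mk.injEq]
      refine ⟨(bin2int_append (pvGroup l offset) D').symm, ?_, trivial⟩
      rw [List.length_append]
      omega

-- ===== VERDICT (by name: the statement is the Claim_ definition above) =====
theorem decode_t4_value_spec : Claim_equal_decode_t4_value := by
  intro body _ hpre
  obtain ⟨_, k, _, hk5, hstop, hfirst, hbits⟩ := hpre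
  have h := loop_corr body.toList k (body.toList.length + 1) 0 (by omega) (by omega)
    (by simpa using hstop)
    (by intro j hj; simpa using hfirst j hj)
    (by intro i hil _ hub hm
        exact hbits i hil (by omega) (by omega))
  rcases h with ⟨D, hA, hB⟩
  unfold Spec_decode_t4_value decode_t4_value decode_t4_value_alt
  rw [hA [], hB]
  simp
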